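-- pv_equiv track=rewrite | github.com/luchungi/ds3_kernel_testing | utils/transformations.py | leadlag
-- ===== SOURCE A (Python) =====
-- def leadlag(X):
--     '''
--     Returns lead-lag-transformed stream of X
--
--     Arguments:
--         X: list, whose elements are tuples of the form
--         (time, value).
--
--     Returns:
--         list of points on the plane, the lead-lag
--         transformed stream of X
--     '''
--
--     l=[]
--
--     for j in range(2*(len(X))-1):
--         i1=j//2
--         i2=j//2
--         if j%2!=0:
--             i1+=1
--         l.append((X[i1][1], X[i2][1]))
--
--     return l
-- ===== SOURCE B (Python) =====
-- def leadlag(X):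
--     if not X:
--         return []
--     vals = [x[1] for x in X]
--     out = [(vals[0], vals[0])]
--     for prev, cur in zip(vals, vals[1:]):
--         out.append((cur, prev))
--         out.append((cur, cur))
--     return out
-- ===== Notes on version B (the rewrite author's own statement) =====
-- stated objective: simpler
-- what changed: Replaces the single 2n-1 indexed loop with j//2 and j%2 branch arithmetic by a guarded empty case plus a pairwise zip loop that emits two points per consecutive pair of values.
import Mathlib
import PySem

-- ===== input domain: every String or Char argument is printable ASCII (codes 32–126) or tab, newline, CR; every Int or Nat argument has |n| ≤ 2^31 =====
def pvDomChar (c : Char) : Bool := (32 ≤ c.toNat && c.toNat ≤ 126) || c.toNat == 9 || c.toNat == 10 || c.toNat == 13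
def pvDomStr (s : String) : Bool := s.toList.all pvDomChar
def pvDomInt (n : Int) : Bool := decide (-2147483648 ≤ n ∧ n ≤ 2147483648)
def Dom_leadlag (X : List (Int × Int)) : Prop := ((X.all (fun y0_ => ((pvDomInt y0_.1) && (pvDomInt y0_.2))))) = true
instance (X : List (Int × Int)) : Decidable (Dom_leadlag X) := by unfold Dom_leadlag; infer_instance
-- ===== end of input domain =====

-- B rebuilds the lead-lag stream from consecutive value pairs (zip) instead of A's
-- single 2n-1 indexed loop with j//2 / j%2 branch arithmetic; same O(n) cost, simpler shape.

-- ===== PORT A =====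
-- A's indexed accesses X[i1], X[i2] are always in range for j in range(2*len(X)-1),
-- so the .getD (0,0) default is never reached (Python never raises here).
def leadlag (X : List (Int × Int)) : List (Int × Int) :=
  (PySem.List.pyRange 0 (2 * (X.length : Int) - 1) 1).foldl
    (fun l j =>
      let i1 := PySem.Int.floordiv j 2
      let i2 := PySem.Int.floordiv j 2
      let i1 := if PySem.Int.mod j 2 ≠ 0 then i1 + 1 else i1
      l ++ [(((PySem.List.pyGet? X i1).getD (0, 0)).2,
             ((PySem.List.pyGet? X i2).getD (0, 0)).2)])
    []

-- ===== PORT B =====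
def leadlag_alt (X : List (Int × Int)) : List (Int × Int) :=
  match X with
  | [] => []
  | x0 :: _ =>
    let vals := X.map (fun x => x.2)
    (List.zip vals (vals.drop 1)).foldl
      (fun out pc => out ++ [(pc.2, pc.1), (pc.2, pc.2)])
      [(x0.2, x0.2)]

-- ===== PRECONDITION & SPEC =====
def Spec_leadlag (X : List (Int × Int)) (out : List (Int × Int)) : Prop := out = leadlag_alt X
instance (X : List (Int × Int)) (out : List (Int × Int)) : Decidable (Spec_leadlag X out) := by unfold Spec_leadlag; infer_instance

-- ===== CLAIM (what is proved, stated in full; the proofs are below) =====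
def Claim_equal_leadlag : Prop := ∀ (X : List (Int × Int)), Dom_leadlag X → Spec_leadlag X (leadlag X)

-- ===== LEMMAS AND PROOFS =====

-- structural reference form of the lead-lag stream
def llGo (p : Int) : List Int → List (Int × Int)
  | [] => []
  | c :: rest => (c, p) :: (c, c) :: llGo c rest

def llRef : List (Int × Int) → List (Int × Int)
  | [] => []
  | x :: xs => (x.2, x.2) :: llGo x.2 (xs.map Prod.snd)

-- the entry A's loop produces at iteration k (Nat form)
def llEntry (X : List (Int × Int)) (k : Nat) : Int × Int :=
  (((X[(if k % 2 = 1 then k / 2 + 1 else k / 2)]?).getD (0, 0)).2,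
   ((X[k / 2]?).getD (0, 0)).2)

theorem zipfold (vs : List Int) : ∀ (p : Int) (acc : List (Int × Int)),
    (List.zip (p :: vs) vs).foldl (fun out pc => out ++ [(pc.2, pc.1), (pc.2, pc.2)]) acc
      = acc ++ llGo p vs := by
  induction vs with
  | nil => intro p acc; simp [llGo]
  | cons c vs ih =>
    intro p acc
    simp only [List.zip_cons_cons, List.foldl_cons, llGo, ih c]
    simp

theorem alt_eq_ref (X : List (Int × Int)) : leadlag_alt X = llRef X := by
  cases X with
  | nil => rfl
  | cons x xs =>
    simp only [leadlag_alt, llRef, List.map_cons, List.drop_succ_cons, List.drop_zero]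
    rw [zipfold]
    simp

theorem leadlag_eq_map (X : List (Int × Int)) :
    leadlag X = (List.range (2 * X.length - 1)).map (llEntry X) := by
  unfold leadlag
  rw [PySem.List.foldl_append_singleton_eq_map, PySem.List.pyRange_one]
  have h : (2 * (X.length : Int) - 1 - 0).toNat = 2 * X.length - 1 := by omega
  rw [h, List.map_map]
  apply List.map_congr_left
  intro k hk
  simp only [Function.comp_apply, llEntry, zero_add]
  rw [(by exact_mod_cast PySem.Int.floordiv_natCast k 2 : PySem.Int.floordiv (k : Int) 2 = ((k / 2 : Nat) : Int)), (by exact_mod_cast PySem.Int.mod_natCast k 2 : PySem.Int.mod (k : Int) 2 = ((k % 2 : Nat) : Int))]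
  generalize k / 2 = m
  by_cases hodd : k % 2 = 1
  · rw [hodd]
    rw [if_pos (by decide : ((1 : Nat) : Int) ≠ 0), if_pos rfl]
    rw [show ((m : Int) + 1) = ((m + 1 : Nat) : Int) by push_cast; ring]
    rw [PySem.List.pyGet?_natCast, PySem.List.pyGet?_natCast]
  · have h0 : k % 2 = 0 := by omega
    rw [h0]
    rw [if_neg (by decide : ¬ ((0 : Nat) : Int) ≠ 0), if_neg (by omega)]
    rw [PySem.List.pyGet?_natCast]

theorem llGo_append (ms : List Int) : ∀ (p w : Int),
    llGo p (ms ++ [w]) = llGo p ms ++ [(w, ms.getLastD p), (w, w)] := by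
  induction ms with
  | nil => intro p w; simp [llGo]
  | cons c ms ih =>
    intro p w
    simp only [List.cons_append, llGo, ih c w, List.getLastD_cons]

theorem map_snd_getLastD (ys : List (Int × Int)) : ∀ (y : Int × Int),
    (ys.map Prod.snd).getLastD y.2 = ((y :: ys).getLastD (0, 0)).2 := by
  induction ys with
  | nil => intro y; simp
  | cons c ys ih =>
    intro y
    simp only [List.map_cons, List.getLastD_cons, ih c]

theorem llRef_append (y : Int × Int) (ys : List (Int × Int)) (a : Int × Int) :
    llRef ((y :: ys) ++ [a])
      = llRef (y :: ys) ++ [(a.2, ((y :: ys).getLastD (0, 0)).2), (a.2, a.2)] := by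
  simp only [List.cons_append, llRef, List.map_append, List.map_cons, List.map_nil,
    llGo_append, map_snd_getLastD]

theorem llEntry_append (Y : List (Int × Int)) (a : Int × Int) (k : Nat)
    (hk : k < 2 * Y.length - 1) : llEntry (Y ++ [a]) k = llEntry Y k := by
  unfold llEntry
  by_cases hodd : k % 2 = 1
  · rw [if_pos hodd,
      List.getElem?_append_left (by omega : k / 2 + 1 < Y.length),
      List.getElem?_append_left (by omega : k / 2 < Y.length)]
  · rw [if_neg hodd,
      List.getElem?_append_left (by omega : k / 2 < Y.length)]

theorem map_entry_eq_ref (X : List (Int × Int)) :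
    (List.range (2 * X.length - 1)).map (llEntry X) = llRef X := by
  induction X using List.reverseRecOn with
  | nil => simp [llRef]
  | append_singleton Y a ih =>
    cases Y with
    | nil => simp [llRef, llGo, llEntry, List.range_succ]
    | cons y ys =>
      have hn : (y :: ys).length = ys.length + 1 := by simp
      set n := ys.length + 1 with hn'
      have hlen : ((y :: ys) ++ [a]).length = n + 1 := by simp [hn']
      have hsplit : 2 * ((y :: ys) ++ [a]).length - 1 = (2 * n - 1) + 1 + 1 := by
        rw [hlen]; omega
      rw [hsplit, List.range_succ, List.range_succ, List.map_append, List.map_append]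
      have hmid : llEntry ((y :: ys) ++ [a]) (2 * n - 1)
          = (a.2, (((y :: ys)).getLastD (0, 0)).2) := by
        unfold llEntry
        rw [if_pos (by omega : (2 * n - 1) % 2 = 1)]
        have h1 : (2 * n - 1) / 2 + 1 = (y :: ys).length := by rw [hn]; omega
        have h2 : (2 * n - 1) / 2 = (y :: ys).length - 1 := by rw [hn]; omega
        rw [h1, h2, List.getElem?_concat_length,
          List.getElem?_append_left (by rw [hn]; omega)]
        rw [← List.getLast?_eq_getElem?, List.getLastD_eq_getLast?]
        rfl
      have htop : llEntry ((y :: ys) ++ [a]) ((2 * n - 1) + 1) = (a.2, a.2) := by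
        unfold llEntry
        rw [if_neg (by omega : ¬ ((2 * n - 1) + 1) % 2 = 1)]
        have h1 : ((2 * n - 1) + 1) / 2 = (y :: ys).length := by rw [hn]; omega
        rw [h1, List.getElem?_concat_length]
        rfl
      have hrest : (List.range (2 * n - 1)).map (llEntry ((y :: ys) ++ [a]))
          = (List.range (2 * n - 1)).map (llEntry (y :: ys)) := by
        apply List.map_congr_left
        intro k hk
        exact llEntry_append _ _ _ (by rw [hn]; exact List.mem_range.mp hk)
      simp only [List.map_singleton]
      rw [hmid, htop, hrest]
      have ih' : (List.range (2 * n - 1)).map (llEntry (y :: ys)) = llRef (y :: ys) := by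
        rw [← ih, hn]
      rw [ih', llRef_append]
      simp

-- ===== VERDICT (by name: the statement is the Claim_ definition above) =====
theorem leadlag_spec : Claim_equal_leadlag := by
  intro X _
  unfold Spec_leadlag
  rw [leadlag_eq_map, map_entry_eq_ref, alt_eq_ref]
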